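-- pv_equiv track=rewrite | github.com/Kim-Dong-Jun99/Algorithm | 프로그래머스/unrated/181186. 아방가르드 타일링/아방가르드 타일링.py | solution
-- ===== SOURCE A (Python) =====
-- def solution(n):
--     dp = [1, 1, 3, 10, 23, 62]
--     if n <= 5:  return dp[n]
--     four = [2, 2, 0]
--     five = [2, 0, 0]
--     six = [0, 0, 0]
--     for i in range(6, n+1):
--         cur = dp[-1] + 2*dp[-2] + 5*dp[-3]
--         idx = (i-2)%3
--         five[idx] += dp[1] << 1
--         cur += five[idx]
--         idx = (i-1)%3
--         four[idx] += dp[2] << 1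
--         cur += four[idx]
--         idx = i%3
--         six[idx] += dp[0] << 2
--         cur += six[idx]
--         dp = dp[1:] + [cur]
--     return dp[-1] % 1_000_000_007
-- ===== SOURCE B (Python) =====
-- def solution(n):
--     base = [1, 1, 3, 10, 23, 62]
--     if n <= 5:
--         return base[n]
--     MOD = 1_000_000_007
--     # Telescoping A's three rotating accumulators gives the fixed-order recurrence
--     # f(k) = f(k-1) + 2 f(k-2) + 6 f(k-3) + f(k-4) - f(k-6); reduce mod MOD each step.
--     a, b, c, d, e, f = base
--     for _ in range(6, n + 1):
--         a, b, c, d, e, f = b, c, d, e, f, (f + 2 * e + 6 * d + c - a) % MOD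
--     return f
-- ===== Notes on version B (the rewrite author's own statement) =====
-- stated objective: faster
-- what changed: Replaced A's three rotating length-3 accumulator arrays by the telescoped fixed-order linear recurrence f(k)=f(k-1)+2f(k-2)+6f(k-3)+f(k-4)-f(k-6) over a sliding 6-window, reduced mod 1_000_000_007 at every step instead of once at the end.
import Mathlib
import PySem

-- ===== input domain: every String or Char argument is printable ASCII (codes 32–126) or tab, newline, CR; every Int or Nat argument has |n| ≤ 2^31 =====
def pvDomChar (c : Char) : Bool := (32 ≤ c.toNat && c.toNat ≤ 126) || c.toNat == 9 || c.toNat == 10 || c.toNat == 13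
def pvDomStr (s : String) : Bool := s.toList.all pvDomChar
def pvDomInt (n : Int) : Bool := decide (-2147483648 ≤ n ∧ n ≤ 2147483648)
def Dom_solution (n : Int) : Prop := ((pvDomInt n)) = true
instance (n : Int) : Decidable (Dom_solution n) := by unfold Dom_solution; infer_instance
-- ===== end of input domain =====

-- B replaces A's three rotating accumulator arrays by the telescoped fixed-order
-- recurrence f(k)=f(k-1)+2f(k-2)+6f(k-3)+f(k-4)-f(k-6), reduced mod 1e9+7 each step
-- (A carries unbounded integers); measurably faster on large n.


-- ===== PORT A =====
-- list element update xs[i] += v is ported with List.set at i.toNat; exact here since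
-- every written index is (…) % 3 ∈ [0,3) and the arrays have length 3.
def stepA (st : List Int × List Int × List Int × List Int) (i : Int) :
    List Int × List Int × List Int × List Int :=
  let dp := st.1
  let four := st.2.1
  let five := st.2.2.1
  let six := st.2.2.2
  let cur := PySem.List.pyGetD dp (-1) 0 + 2 * PySem.List.pyGetD dp (-2) 0
              + 5 * PySem.List.pyGetD dp (-3) 0
  let idx := PySem.Int.mod (i - 2) 3
  let five := five.set idx.toNat (PySem.List.pyGetD five idx 0 + (PySem.List.pyGetD dp 1 0 <<< (1:Nat)))
  let cur := cur + PySem.List.pyGetD five idx 0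
  let idx := PySem.Int.mod (i - 1) 3
  let four := four.set idx.toNat (PySem.List.pyGetD four idx 0 + (PySem.List.pyGetD dp 2 0 <<< (1:Nat)))
  let cur := cur + PySem.List.pyGetD four idx 0
  let idx := PySem.Int.mod i 3
  let six := six.set idx.toNat (PySem.List.pyGetD six idx 0 + (PySem.List.pyGetD dp 0 0 <<< (2:Nat)))
  let cur := cur + PySem.List.pyGetD six idx 0
  (PySem.List.slice dp (some 1) none ++ [cur], four, five, six)

def solution (n : Int) : Int :=
  let dp : List Int := [1, 1, 3, 10, 23, 62]
  if n ≤ 5 then PySem.List.pyGetD dp n 0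
  else
    let st := (PySem.List.pyRange 6 (n + 1) 1).foldl stepA
                (dp, ([2, 2, 0] : List Int), ([2, 0, 0] : List Int), ([0, 0, 0] : List Int))
    PySem.Int.mod (PySem.List.pyGetD st.1 (-1) 0) 1000000007

-- ===== PORT B =====
def stepB (w : Int × Int × Int × Int × Int × Int) : Int × Int × Int × Int × Int × Int :=
  (w.2.1, w.2.2.1, w.2.2.2.1, w.2.2.2.2.1, w.2.2.2.2.2,
   PySem.Int.mod (w.2.2.2.2.2 + 2 * w.2.2.2.2.1 + 6 * w.2.2.2.1 + w.2.2.1 - w.1) 1000000007)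

def solution_alt (n : Int) : Int :=
  let base : List Int := [1, 1, 3, 10, 23, 62]
  if n ≤ 5 then PySem.List.pyGetD base n 0
  else
    let w := (PySem.List.pyRange 6 (n + 1) 1).foldl (fun w _ => stepB w)
               ((1 : Int), (1 : Int), (3 : Int), (10 : Int), (23 : Int), (62 : Int))
    w.2.2.2.2.2

-- ===== PRECONDITION & SPEC =====
-- Pre_ excludes exactly n ≤ -7, where both Pythons raise IndexError on the base-list lookup.
def Pre_solution (n : Int) : Prop := -6 ≤ n
instance (n : Int) : Decidable (Pre_solution n) := by unfold Pre_solution; infer_instance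
def pvWitness_solution : Int := 10

def Spec_solution (n : Int) (out : Int) : Prop := out = solution_alt n
instance (n : Int) (out : Int) : Decidable (Spec_solution n out) := by unfold Spec_solution; infer_instance

-- ===== CLAIM (what is proved, stated in full; the proofs are below) =====
def Claim_equal_solution : Prop := ∀ (n : Int), Dom_solution n → Pre_solution n → Spec_solution n (solution n)

-- ===== LEMMAS AND PROOFS =====

-- the exact (unmodded) sequence A computes, as a sliding 6-window
def Fwin : Nat → Int × Int × Int × Int × Int × Int
  | 0 => (1, 1, 3, 10, 23, 62)
  | (t + 1) =>
    let w := Fwin t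
    (w.2.1, w.2.2.1, w.2.2.2.1, w.2.2.2.2.1, w.2.2.2.2.2,
     w.2.2.2.2.2 + 2 * w.2.2.2.2.1 + 6 * w.2.2.2.1 + w.2.2.1 - w.1)

def F (k : Nat) : Int := (Fwin k).1

-- B's modded window
def Fmwin : Nat → Int × Int × Int × Int × Int × Int
  | 0 => (1, 1, 3, 10, 23, 62)
  | (t + 1) => stepB (Fmwin t)

def Fm (k : Nat) : Int := (Fmwin k).1

-- replicas of A's accumulator arrays after t loop steps (python i = 6 + t)
def fourR : Nat → List Int
  | 0 => [2, 2, 0]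
  | (t + 1) => (fourR t).set ((t + 2) % 3) ((fourR t).getD ((t + 2) % 3) 0 + 2 * F (t + 2))

def fiveR : Nat → List Int
  | 0 => [2, 0, 0]
  | (t + 1) => (fiveR t).set ((t + 1) % 3) ((fiveR t).getD ((t + 1) % 3) 0 + 2 * F (t + 1))

def sixR : Nat → List Int
  | 0 => [0, 0, 0]
  | (t + 1) => (sixR t).set (t % 3) ((sixR t).getD (t % 3) 0 + 4 * F t)

def stA (t : Nat) : List Int × List Int × List Int × List Int :=
  ([F t, F (t + 1), F (t + 2), F (t + 3), F (t + 4), F (t + 5)], fourR t, fiveR t, sixR t)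

theorem F_rec (k : Nat) :
    F (k + 6) = F (k + 5) + 2 * F (k + 4) + 6 * F (k + 3) + F (k + 2) - F k := rfl

theorem Fm_rec (k : Nat) :
    Fm (k + 6) = PySem.Int.mod
      (Fm (k + 5) + 2 * Fm (k + 4) + 6 * Fm (k + 3) + Fm (k + 2) - Fm k) 1000000007 := rfl

theorem len_fourR (t : Nat) : (fourR t).length = 3 := by
  induction t with
  | zero => rfl
  | succ s ih => simp [fourR, ih]

theorem len_fiveR (t : Nat) : (fiveR t).length = 3 := by
  induction t with
  | zero => rfl
  | succ s ih => simp [fiveR, ih]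

theorem len_sixR (t : Nat) : (sixR t).length = 3 := by
  induction t with
  | zero => rfl
  | succ s ih => simp [sixR, ih]

theorem getD_set_self (xs : List Int) (i : Nat) (h : i < xs.length) (v d : Int) :
    (xs.set i v).getD i d = v := by
  induction xs generalizing i with
  | nil => simp at h
  | cons a xs ih =>
    cases i with
    | zero => simp
    | succ j =>
      simp only [List.set_cons_succ, List.getD_cons_succ]
      exact ih j (by simpa using h) 

theorem getD_set_ne (xs : List Int) (i j : Nat) (hij : i ≠ j) (v d : Int) :
    (xs.set i v).getD j d = xs.getD j d := by
  induction xs generalizing i j with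
  | nil => simp [List.set]
  | cons a xs ih =>
    cases i with
    | zero =>
      cases j with
      | zero => exact absurd rfl hij
      | succ m => simp
    | succ k =>
      cases j with
      | zero => simp
      | succ m =>
        simp only [List.set_cons_succ, List.getD_cons_succ]
        exact ih k m (by omega) 

theorem Q : (t : Nat) →
    F (t + 6) = F (t + 5) + 2 * F (t + 4) + 5 * F (t + 3)
      + (fiveR (t + 1)).getD ((t + 1) % 3) 0
      + (fourR (t + 1)).getD ((t + 2) % 3) 0
      + (sixR (t + 1)).getD (t % 3) 0
  | 0 => by decide
  | 1 => by decide
  | 2 => by decide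
  | (s + 3) => by
    have ih := Q s
    -- five
    have h5a : fiveR (s + 4) = (fiveR (s + 3)).set ((s + 4) % 3)
        ((fiveR (s + 3)).getD ((s + 4) % 3) 0 + 2 * F (s + 4)) := rfl
    have h5b : fiveR (s + 3) = (fiveR (s + 2)).set ((s + 3) % 3)
        ((fiveR (s + 2)).getD ((s + 3) % 3) 0 + 2 * F (s + 3)) := rfl
    have h5c : fiveR (s + 2) = (fiveR (s + 1)).set ((s + 2) % 3)
        ((fiveR (s + 1)).getD ((s + 2) % 3) 0 + 2 * F (s + 2)) := rfl
    have e5 : (fiveR (s + 4)).getD ((s + 4) % 3) 0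
        = (fiveR (s + 1)).getD ((s + 1) % 3) 0 + 2 * F (s + 4) := by
      rw [h5a, getD_set_self _ _ (by rw [len_fiveR]; omega), h5b,
          getD_set_ne _ _ _ (by omega), h5c, getD_set_ne _ _ _ (by omega),
          show (s + 4) % 3 = (s + 1) % 3 by omega]
    -- four
    have h4a : fourR (s + 4) = (fourR (s + 3)).set ((s + 5) % 3)
        ((fourR (s + 3)).getD ((s + 5) % 3) 0 + 2 * F (s + 5)) := rfl
    have h4b : fourR (s + 3) = (fourR (s + 2)).set ((s + 4) % 3)
        ((fourR (s + 2)).getD ((s + 4) % 3) 0 + 2 * F (s + 4)) := rfl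
    have h4c : fourR (s + 2) = (fourR (s + 1)).set ((s + 3) % 3)
        ((fourR (s + 1)).getD ((s + 3) % 3) 0 + 2 * F (s + 3)) := rfl
    have e4 : (fourR (s + 4)).getD ((s + 5) % 3) 0
        = (fourR (s + 1)).getD ((s + 2) % 3) 0 + 2 * F (s + 5) := by
      rw [h4a, getD_set_self _ _ (by rw [len_fourR]; omega), h4b,
          getD_set_ne _ _ _ (by omega), h4c, getD_set_ne _ _ _ (by omega),
          show (s + 5) % 3 = (s + 2) % 3 by omega]
    -- six
    have h6a : sixR (s + 4) = (sixR (s + 3)).set ((s + 3) % 3)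
        ((sixR (s + 3)).getD ((s + 3) % 3) 0 + 4 * F (s + 3)) := rfl
    have h6b : sixR (s + 3) = (sixR (s + 2)).set ((s + 2) % 3)
        ((sixR (s + 2)).getD ((s + 2) % 3) 0 + 4 * F (s + 2)) := rfl
    have h6c : sixR (s + 2) = (sixR (s + 1)).set ((s + 1) % 3)
        ((sixR (s + 1)).getD ((s + 1) % 3) 0 + 4 * F (s + 1)) := rfl
    have e6 : (sixR (s + 4)).getD ((s + 3) % 3) 0
        = (sixR (s + 1)).getD (s % 3) 0 + 4 * F (s + 3) := by
      rw [h6a, getD_set_self _ _ (by rw [len_sixR]; omega), h6b,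
          getD_set_ne _ _ _ (by omega), h6c, getD_set_ne _ _ _ (by omega),
          show (s + 3) % 3 = s % 3 by omega]
    have hrec := F_rec (s + 3)
    simp only [show s + 3 + 1 = s + 4 from rfl, show s + 3 + 2 = s + 5 from rfl,
        show s + 3 + 3 = s + 6 from rfl, show s + 3 + 4 = s + 7 from rfl,
        show s + 3 + 5 = s + 8 from rfl, show s + 3 + 6 = s + 9 from rfl] at hrec ⊢
    rw [e5, e4, e6]
    omega

theorem sh1 (a : Int) : a <<< (1 : Nat) = 2 * a := by
  rw [Int.shiftLeft_eq]; ring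

theorem sh2 (a : Int) : a <<< (2 : Nat) = 4 * a := by
  rw [Int.shiftLeft_eq]; ring

theorem stepA_stA (t : Nat) : stepA (stA t) (6 + (t : Int)) = stA (t + 1) := by
  have e1 : PySem.Int.mod (6 + (t : Int) - 2) 3 = (((t + 1) % 3 : Nat) : Int) := by
    rw [PySem.Int.mod_eq_emod_of_pos (by norm_num)]; push_cast; omega
  have e2 : PySem.Int.mod (6 + (t : Int) - 1) 3 = (((t + 2) % 3 : Nat) : Int) := by
    rw [PySem.Int.mod_eq_emod_of_pos (by norm_num)]; push_cast; omega
  have e3 : PySem.Int.mod (6 + (t : Int)) 3 = ((t % 3 : Nat) : Int) := by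
    rw [PySem.Int.mod_eq_emod_of_pos (by norm_num)]; push_cast; omega
  have d1 : PySem.List.pyGetD [F t, F (t+1), F (t+2), F (t+3), F (t+4), F (t+5)] (-1) 0 = F (t+5) := rfl
  have d2 : PySem.List.pyGetD [F t, F (t+1), F (t+2), F (t+3), F (t+4), F (t+5)] (-2) 0 = F (t+4) := rfl
  have d3 : PySem.List.pyGetD [F t, F (t+1), F (t+2), F (t+3), F (t+4), F (t+5)] (-3) 0 = F (t+3) := rfl
  have d4 : PySem.List.pyGetD [F t, F (t+1), F (t+2), F (t+3), F (t+4), F (t+5)] 1 0 = F (t+1) := rfl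
  have d5 : PySem.List.pyGetD [F t, F (t+1), F (t+2), F (t+3), F (t+4), F (t+5)] 2 0 = F (t+2) := rfl
  have d6 : PySem.List.pyGetD [F t, F (t+1), F (t+2), F (t+3), F (t+4), F (t+5)] 0 0 = F t := rfl
  have f5 : (fiveR t).set ((t + 1) % 3) ((fiveR t).getD ((t + 1) % 3) 0 + 2 * F (t + 1)) = fiveR (t + 1) := rfl
  have f4 : (fourR t).set ((t + 2) % 3) ((fourR t).getD ((t + 2) % 3) 0 + 2 * F (t + 2)) = fourR (t + 1) := rfl
  have f6 : (sixR t).set (t % 3) ((sixR t).getD (t % 3) 0 + 4 * F t) = sixR (t + 1) := rfl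
  simp only [stepA, stA, e1, e2, e3, d1, d2, d3, d4, d5, d6, sh1, sh2,
    PySem.List.pyGetD_natCast, Int.toNat_natCast, PySem.List.slice_from_one,
    List.tail_cons, f5, f4, f6]
  rw [← Q t]
  simp

theorem stA_zero :
    (([1, 1, 3, 10, 23, 62] : List Int), ([2, 2, 0] : List Int),
      ([2, 0, 0] : List Int), ([0, 0, 0] : List Int)) = stA 0 := rfl

theorem loopA (t : Nat) :
    (PySem.List.pyRange 6 (6 + (t : Int)) 1).foldl stepA (stA 0) = stA t := by
  induction t with
  | zero => simp [PySem.List.pyRange_one_eq_nil]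
  | succ s ih =>
    have : (6 : Int) + (((s : Nat) + 1 : Nat) : Int) = (6 + (s : Int)) + 1 := by push_cast; ring
    rw [this, PySem.List.pyRange_one_succ_right (by omega), List.foldl_append, ih]
    simpa using stepA_stA s

theorem loopB (t : Nat) :
    (PySem.List.pyRange 6 (6 + (t : Int)) 1).foldl (fun w _ => stepB w)
      ((1 : Int), (1 : Int), (3 : Int), (10 : Int), (23 : Int), (62 : Int)) = Fmwin t := by
  induction t with
  | zero => simp [PySem.List.pyRange_one_eq_nil]; rfl
  | succ s ih =>
    have : (6 : Int) + (((s : Nat) + 1 : Nat) : Int) = (6 + (s : Int)) + 1 := by push_cast; ring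
    rw [this, PySem.List.pyRange_one_succ_right (by omega), List.foldl_append, ih]
    rfl

theorem Fm_modeq : (k : Nat) → Int.ModEq 1000000007 (Fm k) (F k)
  | 0 => by decide
  | 1 => by decide
  | 2 => by decide
  | 3 => by decide
  | 4 => by decide
  | 5 => by decide
  | (k + 6) => by
    have h := ((((Fm_modeq (k + 5)).add ((Fm_modeq (k + 4)).mul_left 2)).add
        ((Fm_modeq (k + 3)).mul_left 6)).add (Fm_modeq (k + 2))).sub (Fm_modeq k)
    rw [Fm_rec k, PySem.Int.mod_eq_emod_of_pos (by norm_num)]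
    have base : Int.ModEq 1000000007
        ((Fm (k + 5) + 2 * Fm (k + 4) + 6 * Fm (k + 3) + Fm (k + 2) - Fm k) % 1000000007)
        (Fm (k + 5) + 2 * Fm (k + 4) + 6 * Fm (k + 3) + Fm (k + 2) - Fm k) :=
      Int.emod_emod_of_dvd _ dvd_rfl
    have : Int.ModEq 1000000007
        (F (k + 5) + 2 * F (k + 4) + 6 * F (k + 3) + F (k + 2) - F k) (F (k + 6)) := by
      rw [F_rec k]
    exact base.trans (h.trans this)

theorem Fm_eq_mod (k : Nat) :
    Fm (k + 6) = PySem.Int.mod (F (k + 6)) 1000000007 := by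
  have hm := Fm_modeq (k + 6)
  have hid : Fm (k + 6) % 1000000007 = Fm (k + 6) := by
    rw [Fm_rec k, PySem.Int.mod_eq_emod_of_pos (by norm_num)]
    exact Int.emod_emod_of_dvd _ dvd_rfl
  rw [PySem.Int.mod_eq_emod_of_pos (by norm_num), ← hm, hid]

theorem stA_last (u : Nat) : PySem.List.pyGetD (stA u).1 (-1) 0 = F (u + 5) := rfl

theorem Fmwin_last (u : Nat) : (Fmwin u).2.2.2.2.2 = Fm (u + 5) := rfl

-- ===== VERDICT (by name: the statement is the Claim_ definition above) =====
theorem solution_spec : Claim_equal_solution := by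
  intro n _ _
  unfold Spec_solution
  by_cases h : n ≤ 5
  · simp only [solution, solution_alt, if_pos h]
  · have h6 : 6 ≤ n := by omega
    obtain ⟨k, hk⟩ : ∃ k : Nat, (n - 5).toNat = k + 1 := ⟨(n - 6).toNat, by omega⟩
    have hr : n + 1 = 6 + (((n - 5).toNat : Nat) : Int) := by omega
    have hA : solution n = PySem.Int.mod (F ((n - 5).toNat + 5)) 1000000007 := by
      simp only [solution, if_neg h]
      rw [hr, stA_zero, loopA, stA_last]
    have hB : solution_alt n = Fm ((n - 5).toNat + 5) := by
      simp only [solution_alt, if_neg h]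
      rw [hr, loopB, Fmwin_last]
    rw [hA, hB, hk]
    exact (Fm_eq_mod k).symm
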